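-- pv_equiv track=rewrite | github.com/kristianwiklund/AOC | 2016/9/9.py | decompress2
-- ===== SOURCE A (Python) =====
-- def decompress2(sx,ack=""):
--
--     S=sx.split("(",maxsplit=1)
--     if len(S)==2:
--         (s,sx)=S
--         (c,sx)=sx.split(")",maxsplit=1)
--         (cnt,rpt)=c.split("x")
--         cnt=int(cnt)
--         rpt=int(rpt)
--         ack+=s
--         it = sx[:cnt]
--         sx = sx[cnt:]
--
--         ack+=decompress2(it)*rpt
--         return decompress2(sx,ack=ack)
--
--     else:
--         return ack+sx
-- ===== SOURCE B (Python) =====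
-- def decompress2(sx, ack=""):
--     return ack + _expand(sx)
--
--
-- def _expand(sx):
--     i = sx.find("(")
--     if i < 0:
--         return sx
--     j = sx.index(")", i + 1)
--     cnt_s, rpt_s = sx[i + 1:j].split("x")
--     tail = sx[j + 1:]
--     return sx[:i] + _expand(tail[:int(cnt_s)]) * int(rpt_s) + _expand(tail[int(cnt_s):])
-- ===== Notes on version B (the rewrite author's own statement) =====
-- stated objective: simpler
-- what changed: A's accumulator-threading tail recursion built on str.split(maxsplit=1) is replaced by a wrapper that prepends ack once to a direct structural recursion that finds the marker by index, and builds the result front-to-back as prefix + expanded-chunk*rpt + expanded-rest, with no accumulator.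
import Mathlib
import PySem

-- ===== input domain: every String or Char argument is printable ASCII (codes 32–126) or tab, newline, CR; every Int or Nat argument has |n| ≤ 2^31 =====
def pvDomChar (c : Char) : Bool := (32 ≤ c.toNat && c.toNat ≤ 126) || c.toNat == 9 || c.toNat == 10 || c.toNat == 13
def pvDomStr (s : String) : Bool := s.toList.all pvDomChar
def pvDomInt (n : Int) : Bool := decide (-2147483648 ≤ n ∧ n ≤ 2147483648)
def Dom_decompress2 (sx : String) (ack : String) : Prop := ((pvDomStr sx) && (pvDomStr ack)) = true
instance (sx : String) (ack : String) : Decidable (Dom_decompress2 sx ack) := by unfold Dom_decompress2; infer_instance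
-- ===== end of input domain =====

-- B replaces A's accumulator-threading tail recursion by a wrapper prepending ack once to a
-- direct structural recursion that builds the result front-to-back; same return value.

-- ===== PORT A =====
-- A's recursion, with a fuel guard for totality (fuel = length + 1 always suffices; where the
-- Python raises — no ')' after '(', not exactly one 'x', int() failing — the port returns [],
-- and Pre_decompress2 excludes exactly those inputs).
def decompress2A : Nat → List Char → List Char → List Char
  | 0, _, _ => []
  | f+1, sx, ack =>
    match PySem.Chars.splitOnMax sx ['('] 1 with      -- S = sx.split("(", maxsplit=1)
    | [s, sx1] =>                                     -- len(S) == 2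
      match PySem.Chars.splitOnMax sx1 [')'] 1 with   -- (c, sx) = sx.split(")", maxsplit=1)
      | [c, sx2] =>
        match PySem.Chars.splitOn c ['x'] with        -- (cnt, rpt) = c.split("x")
        | [cntS, rptS] =>
          match PySem.Int.ofChars? cntS, PySem.Int.ofChars? rptS with
          | some cnt, some rpt =>
            decompress2A f (PySem.Chars.slice sx2 (some cnt) none)
              ((ack ++ s) ++ PySem.List.pyRepeat
                 (decompress2A f (PySem.Chars.slice sx2 none (some cnt)) []) rpt)
          | _, _ => []                                -- int() raises ValueError
        | _ => []                                     -- unpacking raises ValueError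
      | _ => []                                       -- unpacking raises ValueError (no ')')
    | _ => ack ++ sx                                  -- len(S) == 1: return ack + sx

def decompress2 (sx : String) (ack : String) : String :=
  String.ofList (decompress2A (sx.toList.length + 1) sx.toList ack.toList)

-- ===== PORT B =====
-- B's helper _expand: no accumulator — the result is assembled front-to-back; the same fuel
-- guard gives totality (length + 1 suffices: each step strictly shrinks the string).
def pvExpandB : Nat → List Char → List Char
  | 0, _ => []
  | f+1, sx =>
    let i := PySem.Chars.find sx ['(']                          -- i = sx.find("(")
    if i < 0 then sx                                            -- return sx
    else
      let j := PySem.Chars.findFrom sx [')'] (i + 1)            -- j = sx.index(")", i + 1)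
      if j < 0 then []                                          -- .index raises ValueError
      else
        match PySem.Chars.splitOn (PySem.Chars.slice sx (some (i+1)) (some j)) ['x'] with
        | [cntS, rptS] =>                                       -- cnt_s, rpt_s = sx[i+1:j].split("x")
          match PySem.Int.ofChars? cntS, PySem.Int.ofChars? rptS with
          | some cnt, some rpt =>
            let tail := PySem.Chars.slice sx (some (j+1)) none  -- tail = sx[j+1:]
            PySem.Chars.slice sx none (some i)
              ++ PySem.List.pyRepeat (pvExpandB f (PySem.Chars.slice tail none (some cnt))) rpt
              ++ pvExpandB f (PySem.Chars.slice tail (some cnt) none)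
          | _, _ => []                                          -- int() raises ValueError
        | _ => []                                               -- unpacking raises ValueError

def decompress2_alt (sx : String) (ack : String) : String :=
  String.ofList (ack.toList ++ pvExpandB (sx.toList.length + 1) sx.toList)

-- ===== PRECONDITION & SPEC =====
-- The AoC v2 grammar checker: every '(' is followed by a ')' with exactly one 'x' between them
-- separating two int()-parsable fields, recursively inside the repeated chunk and the remainder.
-- The fuel argument is only a totality bound (length + 1 always suffices: each step strictly
-- shrinks the string); it never changes the answer on the stated domain.
def pvWf2 : Nat → List Char → Bool
  | 0, _ => false
  | f+1, sx =>
    let i := PySem.Chars.find sx ['(']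
    if i < 0 then true
    else
      let sx1 := sx.drop (i.toNat + 1)
      let k := PySem.Chars.find sx1 [')']
      if k < 0 then false
      else
        match PySem.Chars.splitOn (sx1.take k.toNat) ['x'] with
        | [a, b] =>
          match PySem.Int.ofChars? a, PySem.Int.ofChars? b with
          | some cnt, some _ =>
            let sx2 := sx1.drop (k.toNat + 1)
            pvWf2 f (PySem.List.slice sx2 none (some cnt)) &&
              pvWf2 f (PySem.List.slice sx2 (some cnt) none)
          | _, _ => false
        | _ => false

-- Pre_ holds exactly when the Python A returns normally (raises nowhere in the recursion).
def Pre_decompress2 (sx : String) (ack : String) : Prop :=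
  pvWf2 (sx.toList.length + 1) sx.toList = true
instance (sx : String) (ack : String) : Decidable (Pre_decompress2 sx ack) := by
  unfold Pre_decompress2; infer_instance

def pvWitness_decompress2 : String × String := ("(6x2)(1x3)aXY", "q")

def Spec_decompress2 (sx : String) (ack : String) (out : String) : Prop := out = decompress2_alt sx ack
instance (sx : String) (ack : String) (out : String) : Decidable (Spec_decompress2 sx ack out) := by
  unfold Spec_decompress2; infer_instance

-- ===== CLAIM (what is proved, stated in full; the proofs are below) =====
def Claim_equal_decompress2 : Prop := ∀ (sx : String) (ack : String), Dom_decompress2 sx ack → Pre_decompress2 sx ack → Spec_decompress2 sx ack (decompress2 sx ack)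

-- ===== LEMMAS AND PROOFS =====

lemma pv_singleton_infix_iff_mem (a : Char) (l : List Char) : [a] <:+: l ↔ a ∈ l := by
  constructor
  · rintro ⟨s, t, rfl⟩; simp
  · intro h
    obtain ⟨s, t, rfl⟩ := List.append_of_mem h
    exact ⟨s, t, by simp⟩

lemma pv_go_m0 (c : Char) (f : Nat) (l cur : List Char) (acc : List (List Char))
    (hf : 1 ≤ f) :
    PySem.Chars.splitOnMax.go [c] f 0 l cur acc = acc.reverse ++ [cur.reverse ++ l] := by
  match f, hf with
  | f+1, _ =>
    cases l with
    | nil => simp [PySem.Chars.splitOnMax.go]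
    | cons d r => simp [PySem.Chars.splitOnMax.go]

lemma pv_go_one_no_sep (c : Char) (f : Nat) :
    ∀ (l cur : List Char) (acc : List (List Char)), l.length < f → c ∉ l →
      PySem.Chars.splitOnMax.go [c] f 1 l cur acc = acc.reverse ++ [cur.reverse ++ l] := by
  induction f with
  | zero => intro l cur acc h _; omega
  | succ f ih =>
    intro l cur acc hl hc
    cases l with
    | nil => simp [PySem.Chars.splitOnMax.go]
    | cons d r =>
      have hcd : (c == d) = false := by
        simp only [List.mem_cons, not_or] at hc
        simp [hc.1]
      rw [show PySem.Chars.splitOnMax.go [c] (f+1) 1 (d :: r) cur acc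
            = PySem.Chars.splitOnMax.go [c] f 1 r (d :: cur) acc from by
          simp [PySem.Chars.splitOnMax.go, List.isPrefixOf, hcd]]
      rw [ih r (d :: cur) acc (by simpa using Nat.lt_of_succ_lt_succ hl)
        (fun h => hc (List.mem_cons_of_mem _ h))]
      simp

lemma pv_go_one_found (c : Char) (a : List Char) :
    ∀ (f : Nat) (b cur : List Char) (acc : List (List Char)), a.length + 2 ≤ f → c ∉ a →
      PySem.Chars.splitOnMax.go [c] f 1 (a ++ c :: b) cur acc =
        acc.reverse ++ [cur.reverse ++ a, b] := by
  induction a with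
  | nil =>
    intro f b cur acc hf _
    match f, hf with
    | f+1, _ =>
      rw [show PySem.Chars.splitOnMax.go [c] (f+1) 1 ([] ++ c :: b) cur acc
            = PySem.Chars.splitOnMax.go [c] f 0 b [] (cur.reverse :: acc) from by
          simp [PySem.Chars.splitOnMax.go, List.isPrefixOf]]
      rw [pv_go_m0 c f b [] (cur.reverse :: acc) (by omega)]
      simp
  | cons d a ih =>
    intro f b cur acc hf hc
    have hcd : (c == d) = false := by
      simp only [List.mem_cons, not_or] at hc
      simp [hc.1]
    match f, hf with
    | f+1, hff =>
      rw [show PySem.Chars.splitOnMax.go [c] (f+1) 1 ((d :: a) ++ c :: b) cur acc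
            = PySem.Chars.splitOnMax.go [c] f 1 (a ++ c :: b) (d :: cur) acc from by
          simp [PySem.Chars.splitOnMax.go, List.isPrefixOf, hcd]]
      rw [ih f b (d :: cur) acc (by simp only [List.length_cons] at hff; omega)
        (fun h => hc (List.mem_cons_of_mem _ h))]
      simp

lemma pv_splitOnMax_one_no_sep (c : Char) (cs : List Char) (h : c ∉ cs) :
    PySem.Chars.splitOnMax cs [c] 1 = [cs] := by
  rw [show PySem.Chars.splitOnMax cs [c] 1
        = PySem.Chars.splitOnMax.go [c] (cs.length + 1) 1 cs [] [] from by
      simp [PySem.Chars.splitOnMax]]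
  rw [pv_go_one_no_sep c (cs.length + 1) cs [] [] (by omega) h]
  simp

lemma pv_splitOnMax_one_found (c : Char) (a b : List Char) (h : c ∉ a) :
    PySem.Chars.splitOnMax (a ++ c :: b) [c] 1 = [a, b] := by
  rw [show PySem.Chars.splitOnMax (a ++ c :: b) [c] 1
        = PySem.Chars.splitOnMax.go [c] ((a ++ c :: b).length + 1) 1 (a ++ c :: b) [] [] from by
      simp [PySem.Chars.splitOnMax]]
  rw [pv_go_one_found c a ((a ++ c :: b).length + 1) b [] [] (by simp only [List.length_append, List.length_cons]; omega) h]
  simp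

-- One separator step: the first-occurrence decomposition of sx produced by find.
lemma pv_find_decomp (c : Char) (sx : List Char) (hmem : c ∈ sx) :
    PySem.Chars.find sx [c] = ((PySem.Chars.find sx [c]).toNat : Int) ∧
    (PySem.Chars.find sx [c]).toNat < sx.length ∧
    sx = sx.take (PySem.Chars.find sx [c]).toNat
      ++ c :: sx.drop ((PySem.Chars.find sx [c]).toNat + 1) ∧
    c ∉ sx.take (PySem.Chars.find sx [c]).toNat := by
  have hinf : [c] <:+: sx := (pv_singleton_infix_iff_mem _ _).2 hmem
  have hge : 0 ≤ PySem.Chars.find sx [c] := (PySem.Chars.find_nonneg_iff _ _).2 hinf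
  obtain ⟨hpre, hmin⟩ := PySem.Chars.find_spec (s := sx) (sub := [c]) hge
  set iN := (PySem.Chars.find sx [c]).toNat with hiN
  obtain ⟨t, ht⟩ := hpre
  have hlen : iN < sx.length := by
    by_contra h
    have hnil : sx.drop iN = [] := List.drop_eq_nil_of_le (by omega)
    rw [hnil] at ht
    simp at ht
  have htdrop : t = sx.drop (iN + 1) := by
    have h1 := congrArg (List.drop 1) ht
    simpa [List.drop_drop, Nat.add_comm] using h1
  refine ⟨(Int.toNat_of_nonneg hge).symm, hlen, ?_, ?_⟩
  · conv_lhs => rw [← List.take_append_drop iN sx]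
    rw [← ht, ← htdrop]
    rfl
  · intro hmem2
    obtain ⟨p, hp, hpe⟩ := List.getElem_of_mem hmem2
    have hplt : p < iN := by
      have := List.length_take_le iN sx
      have h2 : (sx.take iN).length = min iN sx.length := List.length_take ..
      omega
    have hpl : p < sx.length := by omega
    have hpe' : sx[p]'hpl = c := by
      rw [← hpe]
      simp [List.getElem_take]
    apply hmin p hplt
    exact ⟨sx.drop (p+1), by rw [List.drop_eq_getElem_cons hpl, hpe']; rfl⟩

lemma pv_find_neg_of_not_mem (c : Char) (sx : List Char) (h : c ∉ sx) :
    PySem.Chars.find sx [c] < 0 := by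
  have hni : ¬ [c] <:+: sx := fun hi => h ((pv_singleton_infix_iff_mem _ _).1 hi)
  have := PySem.Chars.neg_one_le_find sx [c]
  by_contra hge
  exact hni ((PySem.Chars.find_nonneg_iff _ _).1 (by omega))

lemma pv_slice_len_le (xs : List Char) (a? b? : Option Int) :
    (PySem.List.slice xs a? b?).length ≤ xs.length := by
  unfold PySem.List.slice
  simp only [List.length_take, List.length_drop]
  omega

-- The core invariant: on well-formed input (enough fuel), A's accumulator recursion computes
-- ack followed by B's front-to-back expansion.
lemma pv_main : ∀ (f : Nat) (sx ack : List Char), sx.length < f → pvWf2 f sx = true →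
    decompress2A f sx ack = ack ++ pvExpandB f sx := by
  intro f
  induction f with
  | zero => intro sx ack h _; omega
  | succ f ih =>
    intro sx ack hlen hwf
    by_cases hmem : '(' ∈ sx
    · obtain ⟨hfind, hilen, hsx, hnotin⟩ := pv_find_decomp '(' sx hmem
      set iN := (PySem.Chars.find sx ['(']).toNat with hiN
      set t := sx.drop (iN + 1) with htdef
      have hino : ¬ ((iN : Int) < 0) := by omega
      have hsplitA : PySem.Chars.splitOnMax sx ['('] 1 = [sx.take iN, t] := by
        conv_lhs => rw [hsx]
        exact pv_splitOnMax_one_found '(' _ _ hnotin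
      have htlen : t.length = sx.length - (iN + 1) := by
        rw [htdef]; simp
      -- unfold the wf checker one step
      simp only [pvWf2, hfind, hino, if_false, Int.toNat_natCast] at hwf
      rw [← htdef] at hwf
      by_cases hk : ')' ∈ t
      case neg =>
        exfalso
        have := pv_find_neg_of_not_mem ')' t hk
        rw [if_pos this] at hwf
        exact Bool.false_ne_true hwf
      obtain ⟨hfind2, hklen, ht2, hnotin2⟩ := pv_find_decomp ')' t hk
      set kN := (PySem.Chars.find t [')']).toNat with hkN
      set u := t.drop (kN + 1) with hudef
      have hkno : ¬ ((kN : Int) < 0) := by omega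
      have hsplitA2 : PySem.Chars.splitOnMax t [')'] 1 = [t.take kN, u] := by
        conv_lhs => rw [ht2]
        exact pv_splitOnMax_one_found ')' _ _ hnotin2
      rw [hfind2] at hwf
      rw [if_neg hkno] at hwf
      -- the marker must split into two int()-parsable fields
      rcases hsp : PySem.Chars.splitOn (t.take kN) ['x'] with _ | ⟨a, _ | ⟨b, _ | _⟩⟩ <;>
        simp only [hsp, Bool.false_eq_true] at hwf
      rcases hca : PySem.Int.ofChars? a with _ | cnt <;>
        rcases hcb : PySem.Int.ofChars? b with _ | rpt <;>
          simp only [hca, hcb, Bool.false_eq_true, Bool.and_eq_true] at hwf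
      -- length bookkeeping
      have hulen : u.length = t.length - (kN + 1) := by
        rw [hudef]; simp
      have hchunk_le : (PySem.List.slice u none (some cnt)).length ≤ u.length :=
        pv_slice_len_le u none (some cnt)
      have hrest_le : (PySem.List.slice u (some cnt) none).length ≤ u.length :=
        pv_slice_len_le u (some cnt) none
      have hult : u.length < f := by omega
      -- B's arithmetic on indices
      have hk1 : iN + 1 ≤ sx.length := by omega
      have hFF : PySem.Chars.findFrom sx [')'] ((iN : Int) + 1) =
          if PySem.Chars.find t [')'] = -1 then -1
          else ((iN : Int) + 1) + PySem.Chars.find t [')'] := by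
        have h1 := PySem.Chars.findFrom_natCast sx [')'] (iN + 1) hk1
        rw [← htdef] at h1
        push_cast at h1 ⊢
        exact h1
      have hknegone : ¬ PySem.Chars.find t [')'] = -1 := by
        rw [hfind2]; omega
      have hFF' : PySem.Chars.findFrom sx [')'] ((iN : Int) + 1)
          = ((iN + 1 + kN : Nat) : Int) := by
        rw [hFF, if_neg hknegone, hfind2]
        push_cast
        ring
      have hcsl : PySem.Chars.slice sx (some ((iN : Int) + 1))
          (some ((iN + 1 + kN : Nat) : Int)) = t.take kN := by
        rw [show ((iN : Int) + 1) = ((iN + 1 : Nat) : Int) by push_cast; ring]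
        simp only [PySem.Chars.slice_eq_listSlice, PySem.List.slice_natCast]
        rw [← htdef]
        congr 1
        omega
      have htail : PySem.Chars.slice sx (some (((iN + 1 + kN : Nat) : Int) + 1)) none
          = u := by
        rw [show (((iN + 1 + kN : Nat) : Int) + 1) = ((iN + 1 + kN + 1 : Nat) : Int) by
          push_cast; ring]
        simp only [PySem.Chars.slice_eq_listSlice, PySem.List.slice_from_natCast]
        rw [hudef, htdef, List.drop_drop]
        rfl
      have hfront : PySem.Chars.slice sx none (some (iN : Int)) = sx.take iN := by
        simp only [PySem.Chars.slice_eq_listSlice]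
        rw [PySem.List.slice_to sx (by positivity)]
        simp
      have hjno : ¬ (((iN + 1 + kN : Nat) : Int) < 0) := by omega
      -- rewrite A one step
      rw [show decompress2A (f+1) sx ack
            = decompress2A f (PySem.Chars.slice u (some cnt) none)
                ((ack ++ sx.take iN) ++ PySem.List.pyRepeat
                  (decompress2A f (PySem.Chars.slice u none (some cnt)) []) rpt) from by
        simp only [decompress2A, hsplitA, hsplitA2, hsp, hca, hcb]]
      -- rewrite B one step
      rw [show pvExpandB (f+1) sx
            = sx.take iN
              ++ PySem.List.pyRepeat (pvExpandB f (PySem.Chars.slice u none (some cnt))) rpt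
              ++ pvExpandB f (PySem.Chars.slice u (some cnt) none) from by
        simp only [pvExpandB, hfind, hino, if_false, hFF', hjno, hcsl, hsp, hca, hcb,
          htail, hfront]]
      have hsl : PySem.Chars.slice u none (some cnt) = PySem.List.slice u none (some cnt) := by
        simp [PySem.Chars.slice_eq_listSlice]
      have hsr : PySem.Chars.slice u (some cnt) none = PySem.List.slice u (some cnt) none := by
        simp [PySem.Chars.slice_eq_listSlice]
      rw [hsl, hsr,
        ih _ [] (by omega) hwf.1,
        ih _ _ (by omega) hwf.2]
      simp [List.append_assoc]
    · have hfindneg : PySem.Chars.find sx ['('] < 0 := pv_find_neg_of_not_mem '(' sx hmem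
      have hsplitA : PySem.Chars.splitOnMax sx ['('] 1 = [sx] :=
        pv_splitOnMax_one_no_sep '(' sx hmem
      simp only [decompress2A, pvExpandB, hsplitA, if_pos hfindneg]

-- ===== VERDICT (by name: the statement is the Claim_ definition above) =====
theorem decompress2_spec : Claim_equal_decompress2 := by
  intro sx ack _ hpre
  unfold Spec_decompress2 decompress2 decompress2_alt
  rw [pv_main (sx.toList.length + 1) sx.toList ack.toList (by omega) hpre]
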